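-- pv_equiv track=rewrite | github.com/dhubleur-42-projects/woody-woodpacker | srcs/C/compression/tmp_tests/compress_bin.py | find_largest_subbytes
-- ===== SOURCE A (Python) =====
-- def find_largest_subbytes(data: list, i_begin: int):
--     best_i_subbyte = -1
--     best_length_subbyte = 0
--
--     i_search_haystack = max(0, i_begin - 255)
--
--     while i_search_haystack < i_begin:
--         i_haystack = i_search_haystack
--         i_needle = i_begin
--         while i_haystack < i_begin and i_needle < len(data) and data[i_haystack] == data[i_needle]:
--             i_haystack += 1
--             i_needle += 1
--
--         cur_length_subbyte = i_haystack - i_search_haystack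
--         if cur_length_subbyte > best_length_subbyte:
--             best_length_subbyte = cur_length_subbyte
--             best_i_subbyte = i_search_haystack
--
--         i_search_haystack += 1
--
--     return best_i_subbyte, best_length_subbyte
-- ===== SOURCE B (Python) =====
-- def find_largest_subbytes(data: list, i_begin: int):
--     # Candidate-filtering by match length: instead of scanning each window offset
--     # with an inner extension loop, keep the list of offsets still matching at
--     # length k and filter it as k grows; survivors at the final k are exactly the
--     # offsets with maximal match length, the first being the earliest one.
--     n = len(data)
--     cands = list(range(max(0, i_begin - 255), i_begin))
--     k = 0
--     while True:
--         nxt = [s for s in cands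
--                if s + k < i_begin and i_begin + k < n and data[s + k] == data[i_begin + k]]
--         if not nxt:
--             break
--         cands, k = nxt, k + 1
--     return (cands[0], k) if k > 0 else (-1, 0)
-- ===== Notes on version B (the rewrite author's own statement) =====
-- stated objective: alternative
-- what changed: Replaces A's per-offset inner extension scans with a length-indexed candidate-filtering loop: the list of window offsets still matching at length k is filtered as k grows, and the survivors at the final k are exactly the offsets of maximal match length (first survivor = earliest).
import Mathlib
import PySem

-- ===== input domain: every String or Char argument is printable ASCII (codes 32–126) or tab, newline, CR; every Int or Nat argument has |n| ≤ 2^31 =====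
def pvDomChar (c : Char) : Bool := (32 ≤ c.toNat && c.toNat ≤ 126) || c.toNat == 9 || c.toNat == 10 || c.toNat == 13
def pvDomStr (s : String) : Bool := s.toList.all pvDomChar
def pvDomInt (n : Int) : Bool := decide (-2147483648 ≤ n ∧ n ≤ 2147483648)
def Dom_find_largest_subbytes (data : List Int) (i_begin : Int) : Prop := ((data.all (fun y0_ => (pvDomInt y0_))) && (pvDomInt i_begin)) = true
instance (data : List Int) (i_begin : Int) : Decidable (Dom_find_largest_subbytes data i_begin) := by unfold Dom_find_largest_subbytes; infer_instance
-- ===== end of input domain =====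

-- B replaces A's per-offset inner matching scans by a candidate-filtering loop over match lengths (objective: alternative algorithm, same cost).

-- ===== PORT A =====
-- condition of A's inner while loop (short-circuit: indices are only read when in range)
abbrev aCond (data : List Int) (i_begin ih inn : Int) : Prop :=
  ih < i_begin ∧ inn < (data.length : Int) ∧ PySem.List.pyGet? data ih = PySem.List.pyGet? data inn

-- inner while: extend the match; returns the final (i_haystack, i_needle).
-- fuel = i_begin - i_haystack (the loop runs at most that many steps: a totality guard only)
def aInner (data : List Int) (i_begin : Int) (fuel : Nat) (ih inn : Int) : Int × Int :=
  match fuel with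
  | 0 => (ih, inn)
  | fuel + 1 =>
    if aCond data i_begin ih inn then aInner data i_begin fuel (ih + 1) (inn + 1) else (ih, inn)

-- outer while over i_search_haystack, keeping (best_i, best_len);
-- fuel = i_begin - i_search_haystack (exact step count: a totality guard only)
def aLoop (data : List Int) (i_begin : Int) (fuel : Nat) (isearch best_i best_len : Int) : Int × Int :=
  match fuel with
  | 0 => (best_i, best_len)
  | fuel + 1 =>
    if isearch < i_begin then
      let p := aInner data i_begin (i_begin - isearch).toNat isearch i_begin
      let cur := p.1 - isearch
      if cur > best_len then aLoop data i_begin fuel (isearch + 1) isearch cur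
      else aLoop data i_begin fuel (isearch + 1) best_i best_len
    else (best_i, best_len)

def find_largest_subbytes (data : List Int) (i_begin : Int) : Int × Int :=
  aLoop data i_begin (i_begin - max 0 (i_begin - 255)).toNat (max 0 (i_begin - 255)) (-1) 0

-- ===== PORT B =====
-- the comprehension's condition: offset s still matches when extended to length k+1
def bCond (data : List Int) (i_begin : Int) (k : Nat) (s : Int) : Bool :=
  decide (s + (k : Int) < i_begin) && decide (i_begin + (k : Int) < (data.length : Int)) &&
    (PySem.List.pyGet? data (s + (k : Int)) == PySem.List.pyGet? data (i_begin + (k : Int)))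

-- the while-True loop: filter the candidate offsets while some survive;
-- fuel = len(data) + 1 bounds the number of iterations (a totality guard only)
def bLoop (data : List Int) (i_begin : Int) (fuel : Nat) (cands : List Int) (k : Nat) : List Int × Nat :=
  match fuel with
  | 0 => (cands, k)
  | fuel + 1 =>
    if cands.filter (bCond data i_begin k) = [] then (cands, k)
    else bLoop data i_begin fuel (cands.filter (bCond data i_begin k)) (k + 1)

def find_largest_subbytes_alt (data : List Int) (i_begin : Int) : Int × Int :=
  let r := bLoop data i_begin (data.length + 1) (PySem.List.pyRange (max 0 (i_begin - 255)) i_begin 1) 0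
  if 0 < r.2 then (r.1.headD 0, (r.2 : Int)) else (-1, 0)

-- ===== PRECONDITION & SPEC =====
def Spec_find_largest_subbytes (data : List Int) (i_begin : Int) (out : Int × Int) : Prop := out = find_largest_subbytes_alt data i_begin
instance (data : List Int) (i_begin : Int) (out : Int × Int) : Decidable (Spec_find_largest_subbytes data i_begin out) := by unfold Spec_find_largest_subbytes; infer_instance

-- ===== CLAIM (what is proved, stated in full; the proofs are below) =====
def Claim_equal_find_largest_subbytes : Prop := ∀ (data : List Int) (i_begin : Int), Dom_find_largest_subbytes data i_begin → Spec_find_largest_subbytes data i_begin (find_largest_subbytes data i_begin)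

-- ===== LEMMAS AND PROOFS =====

-- match length of window offset ih against needle position inn
def mlen (data : List Int) (i_begin ih inn : Int) : Nat :=
  if h : aCond data i_begin ih inn then mlen data i_begin (ih + 1) (inn + 1) + 1 else 0
termination_by (i_begin - ih).toNat
decreasing_by omega

lemma mlen_char (data : List Int) (i_begin : Int) :
    ∀ (t : Nat) (ih inn : Int),
      t ≤ mlen data i_begin ih inn ↔ ∀ j : Nat, j < t → aCond data i_begin (ih + j) (inn + j) := by
  intro t
  induction t with
  | zero => intro ih inn; simp
  | succ t ih_t =>
    intro ih inn
    rw [mlen]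
    by_cases h : aCond data i_begin ih inn
    · rw [dif_pos h]
      constructor
      · intro hle j hj
        rcases Nat.eq_zero_or_pos j with hj0 | hjp
        · subst hj0; simpa using h
        · obtain ⟨j', rfl⟩ := Nat.exists_eq_add_of_lt hjp
          have := (ih_t (ih + 1) (inn + 1)).mp (by omega) j' (by omega)
          have e1 : ih + 1 + (j' : Int) = ih + ((0 + j' + 1 : Nat) : Int) := by push_cast; ring
          have e2 : inn + 1 + (j' : Int) = inn + ((0 + j' + 1 : Nat) : Int) := by push_cast; ring
          rwa [e1, e2] at this
      · intro hall
        have ht : t ≤ mlen data i_begin (ih + 1) (inn + 1) := by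
          rw [ih_t]
          intro j hj
          have := hall (j + 1) (by omega)
          have e1 : ih + ((j + 1 : Nat) : Int) = ih + 1 + (j : Int) := by push_cast; ring
          have e2 : inn + ((j + 1 : Nat) : Int) = inn + 1 + (j : Int) := by push_cast; ring
          rwa [e1, e2] at this
        omega
    · rw [dif_neg h]
      constructor
      · omega
      · intro hall
        exfalso
        apply h
        have h0 := hall 0 (by omega)
        simpa using h0

-- A's inner loop computes the match length
lemma aInner_eq (data : List Int) (i_begin : Int) :
    ∀ (fuel : Nat) (ih inn : Int), (i_begin - ih).toNat ≤ fuel →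
      aInner data i_begin fuel ih inn =
        (ih + (mlen data i_begin ih inn : Int), inn + (mlen data i_begin ih inn : Int)) := by
  intro fuel
  induction fuel with
  | zero =>
    intro ih inn hn
    have hcond : ¬ aCond data i_begin ih inn := by
      intro h; exact absurd h.1 (by omega)
    rw [mlen, dif_neg hcond]
    show (ih, inn) = _
    simp
  | succ fuel ihn =>
    intro ih inn hn
    show (if aCond data i_begin ih inn then aInner data i_begin fuel (ih + 1) (inn + 1)
      else (ih, inn)) = _
    rw [mlen]
    by_cases h : aCond data i_begin ih inn
    · rw [if_pos h, dif_pos h]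
      rw [ihn (ih + 1) (inn + 1) (by have := h.1; omega)]
      rw [Prod.mk.injEq]
      constructor <;> (push_cast; ring)
    · rw [if_neg h, dif_neg h]
      simp

-- the step of A's outer loop as a fold step
def stepA (data : List Int) (i_begin : Int) (b : Int × Int) (s : Int) : Int × Int :=
  if (mlen data i_begin s i_begin : Int) > b.2 then (s, (mlen data i_begin s i_begin : Int)) else b

lemma aLoop_eq_foldl (data : List Int) (i_begin : Int) :
    ∀ (fuel : Nat) (isearch bi bl : Int), (i_begin - isearch).toNat ≤ fuel →
      aLoop data i_begin fuel isearch bi bl =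
        (PySem.List.pyRange isearch i_begin 1).foldl (stepA data i_begin) (bi, bl) := by
  intro fuel
  induction fuel with
  | zero =>
    intro isearch bi bl hn
    rw [PySem.List.pyRange_one_eq_nil (by omega), List.foldl_nil]
    rfl
  | succ fuel ihn =>
    intro isearch bi bl hn
    by_cases h : isearch < i_begin
    · rw [PySem.List.pyRange_one_cons h, List.foldl_cons]
      have hin := aInner_eq data i_begin ((i_begin - isearch).toNat) isearch i_begin le_rfl
      have hcur : (aInner data i_begin (i_begin - isearch).toNat isearch i_begin).1 - isearch =
          (mlen data i_begin isearch i_begin : Int) := by rw [hin]; ring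
      show (if isearch < i_begin then
          if (aInner data i_begin (i_begin - isearch).toNat isearch i_begin).1 - isearch > bl then
            aLoop data i_begin fuel (isearch + 1) isearch
              ((aInner data i_begin (i_begin - isearch).toNat isearch i_begin).1 - isearch)
          else aLoop data i_begin fuel (isearch + 1) bi bl
        else (bi, bl)) = _
      rw [if_pos h, hcur]
      rw [show stepA data i_begin (bi, bl) isearch =
          if (mlen data i_begin isearch i_begin : Int) > bl then (isearch, (mlen data i_begin isearch i_begin : Int)) else (bi, bl) from rfl]
      by_cases hgt : (mlen data i_begin isearch i_begin : Int) > bl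
      · rw [if_pos hgt, if_pos hgt]
        exact ihn (isearch + 1) isearch _ (by omega)
      · rw [if_neg hgt, if_neg hgt]
        exact ihn (isearch + 1) bi bl (by omega)
    · rw [PySem.List.pyRange_one_eq_nil (by omega), List.foldl_nil]
      show (if isearch < i_begin then _ else (bi, bl)) = (bi, bl)
      rw [if_neg h]

-- maximal match length over a list of offsets
def Mx (data : List Int) (i_begin : Int) (R : List Int) : Nat :=
  R.foldr (fun s m => max (mlen data i_begin s i_begin) m) 0

lemma mx_nil (data : List Int) (i_begin : Int) : Mx data i_begin [] = 0 := rfl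

lemma mx_cons (data : List Int) (i_begin : Int) (a : Int) (R : List Int) :
    Mx data i_begin (a :: R) = max (mlen data i_begin a i_begin) (Mx data i_begin R) := rfl

lemma mx_append (data : List Int) (i_begin : Int) (R : List Int) (s : Int) :
    Mx data i_begin (R ++ [s]) = max (Mx data i_begin R) (mlen data i_begin s i_begin) := by
  induction R with
  | nil =>
    simp only [List.nil_append, Mx, List.foldr_cons, List.foldr_nil]
    omega
  | cons a R ih =>
    rw [List.cons_append, mx_cons, ih, mx_cons]
    omega

lemma mx_le (data : List Int) (i_begin : Int) :
    ∀ (R : List Int) (x : Int), x ∈ R → mlen data i_begin x i_begin ≤ Mx data i_begin R := by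
  intro R
  induction R with
  | nil => intro x hx; simp at hx
  | cons a R ih =>
    intro x hx
    rw [mx_cons]
    rcases List.mem_cons.mp hx with h | h
    · subst h; omega
    · have := ih x h; omega

lemma mx_attained (data : List Int) (i_begin : Int) :
    ∀ (R : List Int), Mx data i_begin R ≠ 0 →
      ∃ x ∈ R, mlen data i_begin x i_begin = Mx data i_begin R := by
  intro R
  induction R with
  | nil => intro h; exact absurd (mx_nil data i_begin) h
  | cons a R ih =>
    intro h
    rw [mx_cons] at h ⊢
    by_cases hc : Mx data i_begin R ≤ mlen data i_begin a i_begin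
    · exact ⟨a, List.mem_cons_self, by omega⟩
    · have hR : Mx data i_begin R ≠ 0 := by omega
      obtain ⟨x, hx, he⟩ := ih hR
      exact ⟨x, List.mem_cons_of_mem _ hx, by omega⟩

-- common midpoint: result expressed from the max length and the surviving offsets
def bOut (data : List Int) (i_begin : Int) (R : List Int) : Int × Int :=
  if 0 < Mx data i_begin R then
    ((R.filter (fun s => decide (Mx data i_begin R ≤ mlen data i_begin s i_begin))).headD 0,
      (Mx data i_begin R : Int))
  else (-1, 0)

lemma bOut_snd (data : List Int) (i_begin : Int) (R : List Int) :
    (bOut data i_begin R).2 = if 0 < Mx data i_begin R then (Mx data i_begin R : Int) else 0 := by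
  unfold bOut
  split_ifs <;> rfl

lemma foldl_stepA_eq_bOut (data : List Int) (i_begin : Int) :
    ∀ (R : List Int), R.foldl (stepA data i_begin) (-1, 0) = bOut data i_begin R := by
  intro R
  induction R using List.reverseRecOn with
  | nil => simp [bOut, mx_nil]
  | append_singleton R s ih =>
    rw [List.foldl_append, List.foldl_cons, List.foldl_nil, ih]
    have hmx := mx_append data i_begin R s
    by_cases hgt : Mx data i_begin R < mlen data i_begin s i_begin
    · -- s strictly improves: new best is (s, mlen s)
      have hcond : (mlen data i_begin s i_begin : Int) > (bOut data i_begin R).2 := by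
        rw [bOut_snd]
        split_ifs <;> omega
      have hmax : max (Mx data i_begin R) (mlen data i_begin s i_begin) =
          mlen data i_begin s i_begin := by omega
      have hfil : R.filter (fun x => decide (mlen data i_begin s i_begin ≤ mlen data i_begin x i_begin)) = [] := by
        rw [List.filter_eq_nil_iff]
        intro x hx
        have := mx_le data i_begin R x hx
        simp only [decide_eq_true_eq]
        omega
      rw [show stepA data i_begin (bOut data i_begin R) s =
          if (mlen data i_begin s i_begin : Int) > (bOut data i_begin R).2
          then (s, (mlen data i_begin s i_begin : Int)) else bOut data i_begin R from rfl]
      rw [if_pos hcond]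
      unfold bOut
      rw [hmx, hmax, if_pos (by omega), List.filter_append, hfil]
      simp
    · -- s does not improve
      have hmax : max (Mx data i_begin R) (mlen data i_begin s i_begin) = Mx data i_begin R := by omega
      have hcond : ¬ (mlen data i_begin s i_begin : Int) > (bOut data i_begin R).2 := by
        rw [bOut_snd]
        split_ifs with h0 <;> omega
      rw [show stepA data i_begin (bOut data i_begin R) s =
          if (mlen data i_begin s i_begin : Int) > (bOut data i_begin R).2
          then (s, (mlen data i_begin s i_begin : Int)) else bOut data i_begin R from rfl]
      rw [if_neg hcond]
      unfold bOut
      rw [hmx, hmax]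
      by_cases h0 : 0 < Mx data i_begin R
      · rw [if_pos h0, if_pos h0]
        obtain ⟨x, hx, he⟩ := mx_attained data i_begin R (by omega)
        have hne : R.filter (fun s => decide (Mx data i_begin R ≤ mlen data i_begin s i_begin)) ≠ [] := by
          intro hnil
          have hmem : x ∈ R.filter (fun s => decide (Mx data i_begin R ≤ mlen data i_begin s i_begin)) := by
            rw [List.mem_filter]; exact ⟨hx, by simp [he]⟩
          rw [hnil] at hmem; simp at hmem
        rw [List.filter_append]
        obtain ⟨a, t, hat⟩ := List.exists_cons_of_ne_nil hne
        rw [hat]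
        simp
      · rw [if_neg h0, if_neg h0]

-- the filter condition of B equals "still matches at length k+1" on offsets matching at length k
lemma bCond_filter (data : List Int) (i_begin : Int) (k : Nat) (R : List Int) :
    (R.filter (fun s => decide (k ≤ mlen data i_begin s i_begin))).filter (bCond data i_begin k) =
      R.filter (fun s => decide (k + 1 ≤ mlen data i_begin s i_begin)) := by
  rw [List.filter_filter]
  apply List.filter_congr
  intro s _
  have hiff : k + 1 ≤ mlen data i_begin s i_begin ↔
      (k ≤ mlen data i_begin s i_begin ∧ aCond data i_begin (s + k) (i_begin + k)) := by
    rw [mlen_char data i_begin (k + 1) s i_begin, mlen_char data i_begin k s i_begin]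
    constructor
    · intro h
      exact ⟨fun j hj => h j (by omega), h k (by omega)⟩
    · rintro ⟨h1, h2⟩ j hj
      rcases Nat.lt_or_ge j k with hlt | hge
      · exact h1 j hlt
      · have hjk : j = k := by omega
        subst hjk; exact h2
  have hbc : bCond data i_begin k s = true ↔ aCond data i_begin (s + k) (i_begin + k) := by
    unfold bCond aCond
    simp only [Bool.and_eq_true, decide_eq_true_eq, beq_iff_eq]
    tauto
  rw [Bool.eq_iff_iff]
  simp only [Bool.and_eq_true, decide_eq_true_eq, hbc, hiff]
  tauto

-- the match length is bounded by len(data) once the needle start is nonnegative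
lemma mlen_le_len (data : List Int) (i_begin : Int) (h : 0 ≤ i_begin) (x : Int) :
    mlen data i_begin x i_begin ≤ data.length := by
  by_contra hlt
  have hall := (mlen_char data i_begin (mlen data i_begin x i_begin) x i_begin).mp le_rfl
  have hc := hall data.length (by omega)
  have h2 := hc.2.1
  omega

lemma mx_le_len (data : List Int) (i_begin : Int) (h : 0 ≤ i_begin) :
    ∀ (R : List Int), Mx data i_begin R ≤ data.length := by
  intro R
  induction R with
  | nil => rw [mx_nil]; omega
  | cons a R ih =>
    rw [mx_cons]
    have := mlen_le_len data i_begin h a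
    omega

lemma bLoop_inv (data : List Int) (i_begin : Int) (R : List Int) :
    ∀ (fuel k : Nat), Mx data i_begin R - k < fuel → k ≤ Mx data i_begin R →
      bLoop data i_begin fuel (R.filter (fun s => decide (k ≤ mlen data i_begin s i_begin))) k =
        (R.filter (fun s => decide (Mx data i_begin R ≤ mlen data i_begin s i_begin)), Mx data i_begin R) := by
  intro fuel
  induction fuel with
  | zero => intro k hn hk; omega
  | succ fuel ihn =>
    intro k hn hk
    show (if (R.filter (fun s => decide (k ≤ mlen data i_begin s i_begin))).filter (bCond data i_begin k) = [] then
        (R.filter (fun s => decide (k ≤ mlen data i_begin s i_begin)), k)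
      else bLoop data i_begin fuel
        ((R.filter (fun s => decide (k ≤ mlen data i_begin s i_begin))).filter (bCond data i_begin k)) (k + 1)) = _
    rcases Nat.eq_or_lt_of_le hk with hke | hklt
    · have hnil : (R.filter (fun s => decide (k ≤ mlen data i_begin s i_begin))).filter (bCond data i_begin k) = [] := by
        rw [bCond_filter, List.filter_eq_nil_iff]
        intro x hx
        have := mx_le data i_begin R x hx
        simp only [decide_eq_true_eq]
        omega
      rw [if_pos hnil, hke]
    · have hne : (R.filter (fun s => decide (k ≤ mlen data i_begin s i_begin))).filter (bCond data i_begin k) ≠ [] := by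
        rw [bCond_filter]
        obtain ⟨x, hx, he⟩ := mx_attained data i_begin R (by omega)
        intro hnil
        have hmem : x ∈ R.filter (fun s => decide (k + 1 ≤ mlen data i_begin s i_begin)) := by
          rw [List.mem_filter]
          refine ⟨hx, ?_⟩
          simp only [decide_eq_true_eq]
          omega
        rw [hnil] at hmem; simp at hmem
      rw [if_neg hne, bCond_filter]
      exact ihn (k + 1) (by omega) (by omega)

lemma filter_zero (data : List Int) (i_begin : Int) (R : List Int) :
    R.filter (fun s => decide (0 ≤ mlen data i_begin s i_begin)) = R := by
  apply List.filter_eq_self.mpr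
  intro x _
  simp

-- ===== VERDICT (by name: the statement is the Claim_ definition above) =====
theorem find_largest_subbytes_spec : Claim_equal_find_largest_subbytes := by
  intro data i_begin _
  unfold Spec_find_largest_subbytes find_largest_subbytes find_largest_subbytes_alt
  set R := PySem.List.pyRange (max 0 (i_begin - 255)) i_begin 1 with hR
  have hA : aLoop data i_begin (i_begin - max 0 (i_begin - 255)).toNat (max 0 (i_begin - 255)) (-1) 0 =
      bOut data i_begin R := by
    rw [aLoop_eq_foldl data i_begin ((i_begin - max 0 (i_begin - 255)).toNat) _ _ _ le_rfl,
      ← hR, foldl_stepA_eq_bOut]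
  have hMxlen : Mx data i_begin R ≤ data.length := by
    rcases eq_or_ne R [] with hR0 | hR0
    · rw [hR0, mx_nil]; omega
    · obtain ⟨x, hx⟩ := List.exists_mem_of_ne_nil _ hR0
      have hmem := PySem.List.mem_pyRange_one.mp (hR ▸ hx)
      have hib : 0 ≤ i_begin := by
        have hlo : 0 ≤ max 0 (i_begin - 255) := le_max_left _ _
        omega
      exact mx_le_len data i_begin hib R
  have hB : bLoop data i_begin (data.length + 1) R 0 =
      (R.filter (fun s => decide (Mx data i_begin R ≤ mlen data i_begin s i_begin)), Mx data i_begin R) := by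
    conv_lhs => rw [← filter_zero data i_begin R]
    exact bLoop_inv data i_begin R (data.length + 1) 0 (by omega) (by omega)
  rw [hA, hB]
  unfold bOut
  by_cases h0 : 0 < Mx data i_begin R
  · simp [h0]
  · simp [h0]
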